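-- pv_equiv track=rewrite | github.com/Robert-Marchinhaki/l2_code_challanges | challange_1/main.py | handle_movement_input
-- ===== SOURCE A (Python) =====
-- CARDINAL_POINTS = {
--     "N": "Norte",
--     "L": "Leste",
--     "S": "Sul",
--     "O": "Oeste",
-- }
--
-- def handle_movement_input(width_length, movement_input, cardinal_point=CARDINAL_POINTS["N"], x_coordinate=0, y_coordinate=0):
--     """
--     return nothing if widht_length is empty or return an string that contain cardinal_point, x_coordinate and y_coordinate
--
--     :param width_length: string with 2 digits (Ex.: 0 0).
--     :param movement_input: an sequence string that represent the movements.
--     :param cardinal_point: receives an cardinal point. By default is N (North).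
--     :param x_coordinate: receives an x coordinate. By default is 0.
--     :param y_coordinate: receives an y coordinate. By default is 0.
--     """
--     if width_length == "":
--         return ""
--
--     for char in movement_input:
--         if char in 'F' and cardinal_point == CARDINAL_POINTS["N"] or char in 'T' and cardinal_point == CARDINAL_POINTS["S"]:
--             y_coordinate += 1
--         elif char in 'F' and cardinal_point == CARDINAL_POINTS["S"] and y_coordinate > 0 or char in 'T' and cardinal_point == CARDINAL_POINTS["N"] and y_coordinate > 0:
--             y_coordinate -= 1
--         elif char in 'F' and cardinal_point == CARDINAL_POINTS["L"] or char in 'T' and cardinal_point == CARDINAL_POINTS["O"]: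
--             x_coordinate += 1
--         elif char in 'F' and cardinal_point == CARDINAL_POINTS["O"] and x_coordinate > 0 or char in 'T' and cardinal_point == CARDINAL_POINTS["L"] and x_coordinate > 0:
--             x_coordinate -= 1
--         elif char == "D":
--             if cardinal_point == CARDINAL_POINTS["N"]:
--                 cardinal_point = CARDINAL_POINTS["L"]
--             elif cardinal_point == CARDINAL_POINTS["L"]:
--                 cardinal_point = CARDINAL_POINTS["S"]
--             elif cardinal_point == CARDINAL_POINTS["S"]:
--                 cardinal_point = CARDINAL_POINTS["O"]
--             elif cardinal_point == CARDINAL_POINTS["O"]: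
--                 cardinal_point = CARDINAL_POINTS["N"]
--         elif char == "E":
--             if cardinal_point == CARDINAL_POINTS["N"]:
--                 cardinal_point = CARDINAL_POINTS["O"]
--             elif cardinal_point == CARDINAL_POINTS["O"]:
--                 cardinal_point = CARDINAL_POINTS["S"]
--             elif cardinal_point == CARDINAL_POINTS["S"]:
--                 cardinal_point = CARDINAL_POINTS["L"]
--             elif cardinal_point == CARDINAL_POINTS["L"]:
--                 cardinal_point = CARDINAL_POINTS["N"]
--
--     return f"{cardinal_point[0]} {x_coordinate} {y_coordinate}"
-- ===== SOURCE B (Python) =====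
-- CARDINAL_POINTS = {
--     "N": "Norte",
--     "L": "Leste",
--     "S": "Sul",
--     "O": "Oeste",
-- }
--
-- DIRS = ["Norte", "Leste", "Sul", "Oeste"]          # clockwise
-- DELTA = [(0, 1), (1, 0), (0, -1), (-1, 0)]         # forward unit vector per direction
--
--
-- def clamped_walk(start, steps):
--     # apply unit steps; a negative step is skipped while the coordinate is not positive
--     for d in steps:
--         if d < 0 and start <= 0:
--             continue
--         start += d
--     return start
--
--
-- def handle_movement_input(width_length, movement_input, cardinal_point=CARDINAL_POINTS["N"], x_coordinate=0, y_coordinate=0):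
--     if width_length == "":
--         return ""
--     if cardinal_point in DIRS:
--         # stage 1: resolve rotations, compiling the movements into one signed
--         # unit-step stream per axis (the two axes are independent)
--         idx = DIRS.index(cardinal_point)
--         xs, ys = [], []
--         for char in movement_input:
--             if char == "D":
--                 idx = (idx + 1) % 4
--             elif char == "E":
--                 idx = (idx - 1) % 4
--             elif char == "F" or char == "T":
--                 dx, dy = DELTA[idx]
--                 if char == "T":
--                     dx, dy = -dx, -dy
--                 if dx:
--                     xs.append(dx)
--                 if dy:
--                     ys.append(dy)
--         # stage 2: replay each axis stream with the zero clamp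
--         cardinal_point = DIRS[idx]
--         x_coordinate = clamped_walk(x_coordinate, xs)
--         y_coordinate = clamped_walk(y_coordinate, ys)
--     return f"{cardinal_point[0]} {x_coordinate} {y_coordinate}"
-- ===== Notes on version B (the rewrite author's own statement) =====
-- stated objective: alternative
-- what changed: B splits A's single stateful loop into staged passes: a first pass resolves rotations with modular index arithmetic and compiles the movements into two independent per-axis streams of signed unit steps (no coordinate logic, no per-direction string branching); a second pass replays each axis stream separately with the zero clamp; dropping the repeated per-character string comparisons gives a constant-factor speedup.
import Mathlib
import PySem

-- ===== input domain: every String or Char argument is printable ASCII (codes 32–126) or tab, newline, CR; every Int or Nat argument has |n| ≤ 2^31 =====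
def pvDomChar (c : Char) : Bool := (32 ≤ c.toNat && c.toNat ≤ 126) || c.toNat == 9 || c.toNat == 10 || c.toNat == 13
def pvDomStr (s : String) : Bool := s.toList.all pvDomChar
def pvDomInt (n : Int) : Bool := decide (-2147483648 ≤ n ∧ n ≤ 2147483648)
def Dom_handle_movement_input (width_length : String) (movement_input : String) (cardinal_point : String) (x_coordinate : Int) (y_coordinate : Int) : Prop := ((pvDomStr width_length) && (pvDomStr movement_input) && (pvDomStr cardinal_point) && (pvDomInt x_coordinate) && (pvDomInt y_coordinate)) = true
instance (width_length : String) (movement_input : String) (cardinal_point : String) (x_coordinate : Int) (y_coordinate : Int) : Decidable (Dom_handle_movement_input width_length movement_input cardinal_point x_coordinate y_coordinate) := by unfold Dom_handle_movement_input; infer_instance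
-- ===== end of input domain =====

-- B replaces A's single stateful loop by staged passes: rotations are resolved first,
-- compiling the movements into one signed unit-step stream per axis, then each axis
-- stream is replayed with the zero clamp (objective: alternative).

-- ===== PORT A =====
-- A's loop body; `char in 'F'` over a single character of the iterated string is exactly
-- equality with 'F' (a substring test against a one-character string), ported as `c == 'F'`.
def pvStepA (st : String × Int × Int) (c : Char) : String × Int × Int :=
  let cp := st.1
  let x := st.2.1
  let y := st.2.2
  if (c == 'F' && cp == "Norte") || (c == 'T' && cp == "Sul") then (cp, x, y + 1)
  else if (c == 'F' && cp == "Sul" && decide (y > 0)) || (c == 'T' && cp == "Norte" && decide (y > 0)) then (cp, x, y - 1)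
  else if (c == 'F' && cp == "Leste") || (c == 'T' && cp == "Oeste") then (cp, x + 1, y)
  else if (c == 'F' && cp == "Oeste" && decide (x > 0)) || (c == 'T' && cp == "Leste" && decide (x > 0)) then (cp, x - 1, y)
  else if c == 'D' then
    ((if cp == "Norte" then "Leste" else if cp == "Leste" then "Sul"
      else if cp == "Sul" then "Oeste" else if cp == "Oeste" then "Norte" else cp), x, y)
  else if c == 'E' then
    ((if cp == "Norte" then "Oeste" else if cp == "Oeste" then "Sul"
      else if cp == "Sul" then "Leste" else if cp == "Leste" then "Norte" else cp), x, y)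
  else st

-- f"{cp[0]} {x} {y}"; cp[0] on an empty cp raises IndexError in Python — excluded by Pre_.
def pvFmt (cp : String) (x y : Int) : String :=
  match PySem.Str.pyGet? cp 0 with
  | some ch => String.ofList (ch :: ' ' :: (PySem.Int.toChars x ++ ' ' :: PySem.Int.toChars y))
  | none => ""

def handle_movement_input (width_length : String) (movement_input : String) (cardinal_point : String) (x_coordinate : Int) (y_coordinate : Int) : String :=
  if width_length == "" then "" else
  let st := movement_input.toList.foldl pvStepA (cardinal_point, x_coordinate, y_coordinate)
  pvFmt st.1 st.2.1 st.2.2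

-- ===== PORT B =====
def pvDirs : List String := ["Norte", "Leste", "Sul", "Oeste"]
def pvDelta : List (Int × Int) := [(0, 1), (1, 0), (0, -1), (-1, 0)]

-- stage 2 of Source B: replay one axis's unit-step stream with the zero clamp
def pvClampStep (x d : Int) : Int := if d < 0 ∧ x ≤ 0 then x else x + d
def pvClampedWalk (start : Int) (steps : List Int) : Int := steps.foldl pvClampStep start

-- stage 1 of Source B: loop body compiling the movements into per-axis step streams
def pvStepB (st : Int × List Int × List Int) (c : Char) : Int × List Int × List Int :=
  let i := st.1
  let xs := st.2.1
  let ys := st.2.2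
  if c == 'D' then (PySem.Int.mod (i + 1) 4, xs, ys)
  else if c == 'E' then (PySem.Int.mod (i - 1) 4, xs, ys)
  else if c == 'F' || c == 'T' then
    let d := PySem.List.pyGetD pvDelta i (0, 0)
    let dx := if c == 'T' then -d.1 else d.1
    let dy := if c == 'T' then -d.2 else d.2
    (i, (if dx ≠ 0 then xs ++ [dx] else xs), (if dy ≠ 0 then ys ++ [dy] else ys))
  else st

def handle_movement_input_alt (width_length : String) (movement_input : String) (cardinal_point : String) (x_coordinate : Int) (y_coordinate : Int) : String :=
  if width_length == "" then "" else
  let res :=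
    match PySem.List.index? pvDirs cardinal_point with
    | some i =>
      let st := movement_input.toList.foldl pvStepB ((i : Int), [], [])
      (PySem.List.pyGetD pvDirs st.1 "",
       pvClampedWalk x_coordinate st.2.1, pvClampedWalk y_coordinate st.2.2)
    | none => (cardinal_point, x_coordinate, y_coordinate)
  pvFmt res.1 res.2.1 res.2.2

-- ===== PRECONDITION & SPEC =====
-- Pre_ excludes only the inputs on which the Python A raises (IndexError from
-- cardinal_point[0] when cardinal_point is the empty string and width_length is not empty).
def Pre_handle_movement_input (width_length : String) (movement_input : String) (cardinal_point : String) (x_coordinate : Int) (y_coordinate : Int) : Prop :=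
  width_length = "" ∨ cardinal_point ≠ ""
instance (width_length : String) (movement_input : String) (cardinal_point : String) (x_coordinate : Int) (y_coordinate : Int) : Decidable (Pre_handle_movement_input width_length movement_input cardinal_point x_coordinate y_coordinate) := by unfold Pre_handle_movement_input; infer_instance

def pvWitness_handle_movement_input : String × String × String × Int × Int := ("5 5", "FFDTE", "Norte", 0, 0)

def Spec_handle_movement_input (width_length : String) (movement_input : String) (cardinal_point : String) (x_coordinate : Int) (y_coordinate : Int) (out : String) : Prop := out = handle_movement_input_alt width_length movement_input cardinal_point x_coordinate y_coordinate
instance (width_length : String) (movement_input : String) (cardinal_point : String) (x_coordinate : Int) (y_coordinate : Int) (out : String) : Decidable (Spec_handle_movement_input width_length movement_input cardinal_point x_coordinate y_coordinate out) := by unfold Spec_handle_movement_input; infer_instance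

-- ===== CLAIM (what is proved, stated in full; the proofs are below) =====
def Claim_equal_handle_movement_input : Prop := ∀ (width_length : String) (movement_input : String) (cardinal_point : String) (x_coordinate : Int) (y_coordinate : Int), Dom_handle_movement_input width_length movement_input cardinal_point x_coordinate y_coordinate → Pre_handle_movement_input width_length movement_input cardinal_point x_coordinate y_coordinate → Spec_handle_movement_input width_length movement_input cardinal_point x_coordinate y_coordinate (handle_movement_input width_length movement_input cardinal_point x_coordinate y_coordinate)

-- ===== LEMMAS AND PROOFS =====

def pvDirName (i : Int) : String := PySem.List.pyGetD pvDirs i ""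

-- one step of stage 1 only appends to the accumulated streams
theorem pvStepB_decomp (i : Int) (xs ys : List Int) (c : Char) :
    pvStepB (i, xs, ys) c =
      ((pvStepB (i, [], []) c).1,
       xs ++ (pvStepB (i, [], []) c).2.1, ys ++ (pvStepB (i, [], []) c).2.2) := by
  simp only [pvStepB]
  split_ifs <;> simp

theorem pvFoldB_decomp (l : List Char) (i : Int) (xs ys : List Int) :
    l.foldl pvStepB (i, xs, ys) =
      ((l.foldl pvStepB (i, [], [])).1,
       xs ++ (l.foldl pvStepB (i, [], [])).2.1, ys ++ (l.foldl pvStepB (i, [], [])).2.2) := by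
  induction l generalizing i xs ys with
  | nil => simp
  | cons c t ih =>
    simp only [List.foldl_cons]
    rcases hs : pvStepB (i, [], []) c with ⟨i', xs', ys'⟩
    rw [pvStepB_decomp i xs ys c, hs, ih i' (xs ++ xs') (ys ++ ys'), ih i' xs' ys']
    simp

-- one step of A on a known direction is one step of stage 1, the appended
-- per-axis steps being replayed by pvClampStep
theorem pvStep_sim (i : Int) (hi : i = 0 ∨ i = 1 ∨ i = 2 ∨ i = 3) (c : Char) (x y : Int) :
    pvStepA (pvDirName i, x, y) c =
      (pvDirName (pvStepB (i, [], []) c).1,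
       pvClampedWalk x (pvStepB (i, [], []) c).2.1,
       pvClampedWalk y (pvStepB (i, [], []) c).2.2) ∧
    ((pvStepB (i, [], []) c).1 = 0 ∨ (pvStepB (i, [], []) c).1 = 1 ∨
     (pvStepB (i, [], []) c).1 = 2 ∨ (pvStepB (i, [], []) c).1 = 3) := by
  have hc : c = 'D' ∨ c = 'E' ∨ c = 'F' ∨ c = 'T' ∨ (c ≠ 'D' ∧ c ≠ 'E' ∧ c ≠ 'F' ∧ c ≠ 'T') := by
    by_cases h1 : c = 'D'; · exact Or.inl h1
    by_cases h2 : c = 'E'; · exact Or.inr (Or.inl h2)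
    by_cases h3 : c = 'F'; · exact Or.inr (Or.inr (Or.inl h3))
    by_cases h4 : c = 'T'; · exact Or.inr (Or.inr (Or.inr (Or.inl h4)))
    exact Or.inr (Or.inr (Or.inr (Or.inr ⟨h1, h2, h3, h4⟩)))
  rcases hi with rfl | rfl | rfl | rfl <;>
    rcases hc with rfl | rfl | rfl | rfl | ⟨h1, h2, h3, h4⟩ <;>
    by_cases hx : x > 0 <;> by_cases hy : y > 0 <;>
    simp_all [pvStepA, pvStepB, pvDirName, pvDirs, pvDelta, pvClampedWalk, pvClampStep,
      PySem.List.pyGetD, PySem.Int.mod] <;>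
    (try split_ifs) <;> simp_all [Int.sub_eq_add_neg] <;> omega

theorem pvFold_sim (l : List Char) (i x y : Int) (hi : i = 0 ∨ i = 1 ∨ i = 2 ∨ i = 3) :
    l.foldl pvStepA (pvDirName i, x, y) =
      (pvDirName (l.foldl pvStepB (i, [], [])).1,
       pvClampedWalk x (l.foldl pvStepB (i, [], [])).2.1,
       pvClampedWalk y (l.foldl pvStepB (i, [], [])).2.2) ∧
    ((l.foldl pvStepB (i, [], [])).1 = 0 ∨ (l.foldl pvStepB (i, [], [])).1 = 1 ∨
     (l.foldl pvStepB (i, [], [])).1 = 2 ∨ (l.foldl pvStepB (i, [], [])).1 = 3) := by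
  induction l generalizing i x y with
  | nil => exact ⟨rfl, hi⟩
  | cons c t ih =>
    obtain ⟨h1, h2⟩ := pvStep_sim i hi c x y
    obtain ⟨ih1, ih2⟩ := ih (pvStepB (i, [], []) c).1
      (pvClampedWalk x (pvStepB (i, [], []) c).2.1)
      (pvClampedWalk y (pvStepB (i, [], []) c).2.2) h2
    refine ⟨?_, ?_⟩ <;>
      simp only [List.foldl_cons, h1, ih2,
        pvFoldB_decomp t (pvStepB (i, [], []) c).1 (pvStepB (i, [], []) c).2.1
          (pvStepB (i, [], []) c).2.2, pvClampedWalk, List.foldl_append] <;> try trivial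

-- on an unknown direction A's loop body is the identity
theorem pvStepA_unknown (cp : String) (h : cp ∉ pvDirs) (c : Char) (x y : Int) :
    pvStepA (cp, x, y) c = (cp, x, y) := by
  simp only [pvDirs, List.mem_cons, List.not_mem_nil, or_false, not_or] at h
  obtain ⟨h1, h2, h3, h4⟩ := h
  simp [pvStepA, h1, h2, h3, h4]

theorem pvFoldA_unknown (l : List Char) (cp : String) (h : cp ∉ pvDirs) (x y : Int) :
    l.foldl pvStepA (cp, x, y) = (cp, x, y) := by
  induction l generalizing x y with
  | nil => rfl
  | cons c t ih => simp [List.foldl_cons, pvStepA_unknown cp h c x y, ih]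

-- ===== VERDICT (by name: the statement is the Claim_ definition above) =====
theorem handle_movement_input_spec : Claim_equal_handle_movement_input := by
  intro w m cp x y _ _
  unfold Spec_handle_movement_input handle_movement_input handle_movement_input_alt
  by_cases hw : w == ""
  · simp [hw]
  · simp only [hw, Bool.false_eq_true, if_false]
    rcases hidx : PySem.List.index? pvDirs cp with _ | k
    · -- cardinal_point is not one of the four directions: both sides leave the state alone
      have hni : cp ∉ pvDirs := (PySem.List.index?_eq_none_iff pvDirs cp).mp hidx
      simp [pvFoldA_unknown m.toList cp hni x y]
    · -- cardinal_point = pvDirs[k]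
      obtain ⟨hk, hget, -⟩ := PySem.List.getElem_of_index?_eq_some hidx
      have hcp : cp = pvDirName (k : Int) := by
        simp only [pvDirName, PySem.List.pyGetD_natCast]
        rw [List.getD_eq_getElem _ _ hk, hget]
      have hk4 : k < 4 := by simpa [pvDirs] using hk
      have hi : (k : Int) = 0 ∨ (k : Int) = 1 ∨ (k : Int) = 2 ∨ (k : Int) = 3 := by
        interval_cases k <;> simp
      obtain ⟨hfold, -⟩ := pvFold_sim m.toList (k : Int) x y hi
      rw [hcp, hfold]
      simp [pvDirName]
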